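-- pv_equiv track=rewrite | github.com/memgraph/mage | scripts/cve_message.py | format_slack_table
-- ===== SOURCE A (Python) =====
-- from typing import List, Tuple
--
-- def format_slack_table(items: List[dict]) -> str:
--     """
--     Given a list of dicts with keys: Product, Version, Severity, CVE,
--     return a string containing a code-block table with evenly padded columns.
--
--     Inputs
--     ======
--     items: List[dict]
--         A list of dicts with keys Product, Version, Severity, CVE
--
--     Returns
--     =======
--     str: A string containing a code-block table with evenly padded columns
--     """
--     if not items:
--         return "```Nothing to see here...```"
--
--     # 1) Define your columns and compute the max width for each
--     headers = ["Product", "Version", "Severity", "CVE"]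
--     widths = {}
--     for h in headers:
--         widths[h] = max(
--             len(h),
--             *(len(str(item.get(h, ""))) for item in items)
--         )
--
--     # 2) Build the header row and a separator
--     header_row = " | ".join(h.ljust(widths[h]) for h in headers)
--     sep_row = "-+-".join("-" * widths[h] for h in headers)
--
--     # 3) Build each data row
--     data_rows = []
--     for item in items:
--         row = " | ".join(str(item.get(h, "")).ljust(widths[h]) for h in headers)
--         data_rows.append(row)
--
--     # 4) Wrap it all in a code block
--     table = "\n".join([header_row, sep_row] + data_rows)
--     return f"```\n{table}\n```"
-- ===== SOURCE B (Python) =====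
-- def format_slack_table(items):
--     if not items:
--         return "```Nothing to see here...```"
--     headers = ["Product", "Version", "Severity", "CVE"]
--
--     def column(h):
--         # column-major: header cell, then one cell per item; pad the whole
--         # column to its own max width and splice in the separator cell
--         cells = [h] + [str(item.get(h, "")) for item in items]
--         w = max(len(c) for c in cells)
--         padded = [c.ljust(w) for c in cells]
--         return [padded[0], "-" * w] + padded[1:]
--
--     def transpose(cols):
--         if any(not c for c in cols):
--             return []
--         return [[c[0] for c in cols]] + transpose([c[1:] for c in cols])
--
--     rows = transpose([column(h) for h in headers])
--     seps = [" | ", "-+-"] + [" | "] * len(items)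
--     lines = [sep.join(row) for sep, row in zip(seps, rows)]
--     return "```\n" + "\n".join(lines) + "\n```"
-- ===== Notes on version B (the rewrite author's own statement) =====
-- stated objective: alternative
-- what changed: B assembles the table column-major: each padded column (with its separator cell spliced in after the header cell) is built independently, and a recursive transpose turns the four columns into rows, instead of A's row-major assembly driven by a per-header width dictionary.
import Mathlib
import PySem

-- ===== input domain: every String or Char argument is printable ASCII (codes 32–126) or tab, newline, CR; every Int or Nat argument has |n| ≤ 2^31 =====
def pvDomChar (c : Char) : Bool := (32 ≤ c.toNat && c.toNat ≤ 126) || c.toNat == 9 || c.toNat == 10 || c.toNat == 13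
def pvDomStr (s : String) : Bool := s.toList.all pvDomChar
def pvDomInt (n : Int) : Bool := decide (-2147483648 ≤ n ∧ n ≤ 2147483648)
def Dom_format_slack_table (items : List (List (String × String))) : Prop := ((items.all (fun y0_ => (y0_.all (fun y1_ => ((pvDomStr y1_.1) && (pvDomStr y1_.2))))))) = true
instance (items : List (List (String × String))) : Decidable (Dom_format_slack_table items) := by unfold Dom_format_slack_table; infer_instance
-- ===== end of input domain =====

-- B builds the table COLUMN-major: each padded column (with its separator cell spliced in) is
-- produced independently, and a recursive transpose turns the columns into rows — a different
-- traversal order from A's row-major assembly with a width dictionary (objective: alternative).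

-- str.ljust(w): pad with spaces on the right (no-op when already at least w wide)
def pvLjust (s : String) (w : Nat) : String :=
  String.ofList (s.toList ++ List.replicate (w - s.toList.length) ' ')

-- ===== PORT A =====
def pvHeadersA : List String := ["Product", "Version", "Severity", "CVE"]

def format_slack_table (items : List (List (String × String))) : String :=
  if items = [] then "```Nothing to see here...```"
  else
    -- widths[h] = max(len(h), *(len(str(item.get(h,""))) for item in items))
    let widths : PySem.Dict String Nat :=
      pvHeadersA.foldl (fun ws h =>
        PySem.Dict.insert ws h
          ((items.map (fun item => (PySem.Dict.getD (PySem.Dict.mk item) h "").toList.length)).foldl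
            max h.toList.length)) PySem.Dict.empty
    let header_row :=
      PySem.Str.join " | " (pvHeadersA.map (fun h => pvLjust h (PySem.Dict.getD widths h 0)))
    let sep_row :=
      PySem.Str.join "-+-"
        (pvHeadersA.map (fun h => String.ofList (List.replicate (PySem.Dict.getD widths h 0) '-')))
    let data_rows :=
      items.foldl (fun acc item =>
        acc ++ [PySem.Str.join " | "
          (pvHeadersA.map (fun h =>
            pvLjust (PySem.Dict.getD (PySem.Dict.mk item) h "") (PySem.Dict.getD widths h 0)))]) []
    let table := PySem.Str.join "\n" ([header_row, sep_row] ++ data_rows)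
    "```\n" ++ table ++ "\n```"

-- ===== PORT B =====
def pvHeadersB : List String := ["Product", "Version", "Severity", "CVE"]

-- termination measure for pvTranspose (cited by its decreasing_by)
lemma pvTranspose_dec {α : Type} : ∀ (cols : List (List α)), cols ≠ [] →
    (cols.any List.isEmpty) = false →
    ((cols.map List.tail).map List.length).sum < (cols.map List.length).sum := by
  intro cols hne hall
  induction cols with
  | nil => simp at hne
  | cons c cs ih =>
    simp only [List.any_cons, Bool.or_eq_false_iff] at hall
    cases cs with
    | nil =>
      cases c with
      | nil => simp at hall
      | cons x xs => simp
    | cons d ds =>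
      have := ih (by simp) hall.2
      have hc : c.tail.length ≤ c.length := by
        cases c <;> simp
      simp only [List.map_cons, List.sum_cons] at this ⊢
      omega

-- Source B's recursive transpose (the [] guard only makes the recursion total; Source B never calls it with [])
def pvTranspose {α : Type} (cols : List (List α)) : List (List α) :=
  if cols = [] ∨ cols.any List.isEmpty then []
  else
    cols.filterMap List.head? :: pvTranspose (cols.map List.tail)
termination_by (cols.map List.length).sum
decreasing_by
  rename_i h
  refine pvTranspose_dec cols (fun hc => h (Or.inl hc)) ?_
  cases e : cols.any List.isEmpty with
  | false => rfl
  | true => exact absurd (Or.inr e) h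

-- Source B's column(h): header cell + item cells, padded to the column's max width, separator spliced in
def pvColumn (items : List (List (String × String))) (h : String) : List String :=
  let cells : List String := h :: items.map (fun item => PySem.Dict.getD (PySem.Dict.mk item) h "")
  let w : Nat := (cells.map (fun c => c.toList.length)).foldl max 0
  let padded := cells.map (fun c => pvLjust c w)
  padded.headD "" :: String.ofList (List.replicate w '-') :: padded.tail

def format_slack_table_alt (items : List (List (String × String))) : String :=
  if items = [] then "```Nothing to see here...```"
  else
    let rows := pvTranspose (pvHeadersB.map (pvColumn items))
    let seps := " | " :: "-+-" :: List.replicate items.length " | "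
    let lines := List.zipWith (fun sep row => PySem.Str.join sep row) seps rows
    "```\n" ++ PySem.Str.join "\n" lines ++ "\n```"

-- ===== PRECONDITION & SPEC =====
def Spec_format_slack_table (items : List (List (String × String))) (out : String) : Prop := out = format_slack_table_alt items
instance (items : List (List (String × String))) (out : String) : Decidable (Spec_format_slack_table items out) := by unfold Spec_format_slack_table; infer_instance

-- ===== CLAIM (what is proved, stated in full; the proofs are below) =====
def Claim_equal_format_slack_table : Prop := ∀ (items : List (List (String × String))), Dom_format_slack_table items → Spec_format_slack_table items (format_slack_table items)

-- ===== LEMMAS AND PROOFS =====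

-- one step of the recursive transpose on four nonempty columns
lemma pvTranspose_step {α : Type} (a1 a2 a3 a4 : α) (t1 t2 t3 t4 : List α) :
    pvTranspose [a1 :: t1, a2 :: t2, a3 :: t3, a4 :: t4]
      = [a1, a2, a3, a4] :: pvTranspose [t1, t2, t3, t4] := by
  rw [pvTranspose]; simp

-- transposing four mapped copies of the same list = mapping the 4-cell row builder
lemma pvTranspose4 {α β : Type} (f1 f2 f3 f4 : α → β) : ∀ (l : List α),
    pvTranspose [l.map f1, l.map f2, l.map f3, l.map f4]
      = l.map (fun x => [f1 x, f2 x, f3 x, f4 x]) := by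
  intro l
  induction l with
  | nil => rw [pvTranspose]; simp
  | cons x xs ih => simp [pvTranspose_step, ih]

-- zipping a constant separator list against mapped rows = mapping the join
lemma pvZipRep {α : Type} (s : String) (r : α → List String) : ∀ (l : List α),
    List.zipWith (fun sep row => PySem.Str.join sep row) (List.replicate l.length s) (l.map r)
      = l.map (fun x => PySem.Str.join s (r x)) := by
  intro l
  induction l with
  | nil => simp
  | cons x xs ih => simp [List.replicate_succ, ih]

-- flattening a map of singletons (the shape A's data_rows foldl leaves behind)
lemma pvFlattenSingleton {α β : Type} (f : α → β) :
    ∀ (l : List α), (l.map (fun x => [f x])).flatten = l.map f := by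
  intro l; induction l with
  | nil => simp
  | cons x xs ih => simp [ih]

-- ===== VERDICT (by name: the statement is the Claim_ definition above) =====
theorem format_slack_table_spec : Claim_equal_format_slack_table := by
  intro items _
  unfold Spec_format_slack_table format_slack_table format_slack_table_alt
  by_cases h : items = []
  · simp [h]
  · simp only [h, if_false]
    simp [pvHeadersA, pvHeadersB, pvColumn, pvTranspose_step, pvTranspose4, pvZipRep,
      pvFlattenSingleton, PySem.Dict.getD, PySem.Dict.get?, PySem.Dict.insert, PySem.Dict.empty,
      PySem.Dict.contains, List.find?, Function.comp_def, List.zipWith]
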